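-- pv_equiv track=rewrite | github.com/CGCL-codes/RDLSA | TrainAntonymAttention.py | process_rank
-- ===== SOURCE A (Python) =====
-- def process_rank(rank):
--     top1 = 0
--     top3 = 0
--     top10 = 0
--     top20 = 0
--     for r in rank:
--         if r <= 1:
--             top1 += 1
--         if r <= 3:
--             top3 += 1
--         if r <= 10:
--             top10 += 1
--         if r <= 20:
--             top20 += 1
--     return top1, top3, top10, top20
-- ===== SOURCE B (Python) =====
-- def process_rank(rank):
--     def count_le(t):
--         return sum(1 for r in rank if r <= t)
--     return count_le(1), count_le(3), count_le(10), count_le(20)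
-- ===== Notes on version B (the rewrite author's own statement) =====
-- stated objective: simpler
-- what changed: Replaces the single four-counter accumulator loop with a count_le helper: four independent filtered counts (one per threshold) expressed as generator sums.
import Mathlib
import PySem

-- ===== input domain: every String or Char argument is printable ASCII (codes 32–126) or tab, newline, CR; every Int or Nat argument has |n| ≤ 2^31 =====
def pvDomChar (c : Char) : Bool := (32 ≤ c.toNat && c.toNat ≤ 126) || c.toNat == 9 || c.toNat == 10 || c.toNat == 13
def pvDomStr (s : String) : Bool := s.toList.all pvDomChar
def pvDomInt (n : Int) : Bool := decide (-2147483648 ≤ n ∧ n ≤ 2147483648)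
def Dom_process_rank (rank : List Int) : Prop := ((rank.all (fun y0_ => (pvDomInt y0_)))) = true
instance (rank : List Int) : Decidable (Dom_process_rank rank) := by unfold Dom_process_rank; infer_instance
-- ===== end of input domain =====

-- B replaces A's single four-counter loop by four independent filtered counts (simpler decomposition, same O(n) cost).

-- ===== PORT A =====
-- one pass, four counters, four independent `if`s per element
def process_rank (rank : List Int) : Int × Int × Int × Int :=
  let st := rank.foldl (fun (s : Int × Int × Int × Int) r =>
    let s := if r ≤ 1 then (s.1 + 1, s.2.1, s.2.2.1, s.2.2.2) else s
    let s := if r ≤ 3 then (s.1, s.2.1 + 1, s.2.2.1, s.2.2.2) else s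
    let s := if r ≤ 10 then (s.1, s.2.1, s.2.2.1 + 1, s.2.2.2) else s
    let s := if r ≤ 20 then (s.1, s.2.1, s.2.2.1, s.2.2.2 + 1) else s
    s) (0, 0, 0, 0)
  st

-- ===== PORT B =====
-- count_le t = sum(1 for r in rank if r <= t)
def pvCountLe (rank : List Int) (t : Int) : Int :=
  rank.foldl (fun acc r => if r ≤ t then acc + 1 else acc) 0

def process_rank_alt (rank : List Int) : Int × Int × Int × Int :=
  (pvCountLe rank 1, pvCountLe rank 3, pvCountLe rank 10, pvCountLe rank 20)

-- ===== PRECONDITION & SPEC =====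
def Spec_process_rank (rank : List Int) (out : Int × Int × Int × Int) : Prop := out = process_rank_alt rank
instance (rank : List Int) (out : Int × Int × Int × Int) : Decidable (Spec_process_rank rank out) := by unfold Spec_process_rank; infer_instance

-- ===== CLAIM (what is proved, stated in full; the proofs are below) =====
def Claim_equal_process_rank : Prop := ∀ (rank : List Int), Dom_process_rank rank → Spec_process_rank rank (process_rank rank)

-- ===== LEMMAS AND PROOFS =====
theorem pvCountLe_acc (rank : List Int) (t a : Int) :
    rank.foldl (fun acc r => if r ≤ t then acc + 1 else acc) a = a + pvCountLe rank t := by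
  induction rank generalizing a with
  | nil => simp [pvCountLe]
  | cons x xs ih =>
    simp only [pvCountLe, List.foldl_cons]
    rw [ih, ih]
    split_ifs <;> ring

theorem pvCountLe_cons (x : Int) (xs : List Int) (t : Int) :
    pvCountLe (x :: xs) t = (if x ≤ t then 1 else 0) + pvCountLe xs t := by
  simp only [pvCountLe, List.foldl_cons]
  split_ifs with h
  · exact pvCountLe_acc xs t 1
  · rw [pvCountLe_acc xs t 0]; ring

theorem process_rank_loop (rank : List Int) (a b c d : Int) :
    rank.foldl (fun (s : Int × Int × Int × Int) r =>
      let s := if r ≤ 1 then (s.1 + 1, s.2.1, s.2.2.1, s.2.2.2) else s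
      let s := if r ≤ 3 then (s.1, s.2.1 + 1, s.2.2.1, s.2.2.2) else s
      let s := if r ≤ 10 then (s.1, s.2.1, s.2.2.1 + 1, s.2.2.2) else s
      let s := if r ≤ 20 then (s.1, s.2.1, s.2.2.1, s.2.2.2 + 1) else s
      s) (a, b, c, d)
    = (a + pvCountLe rank 1, b + pvCountLe rank 3, c + pvCountLe rank 10, d + pvCountLe rank 20) := by
  induction rank generalizing a b c d with
  | nil => simp [pvCountLe]
  | cons x xs ih =>
    simp only [List.foldl_cons, pvCountLe_cons]
    split_ifs <;>
      (rw [ih]; simp only [Prod.mk.injEq]; refine ⟨by ring, by ring, by ring, by ring⟩)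

-- ===== VERDICT (by name: the statement is the Claim_ definition above) =====
theorem process_rank_spec : Claim_equal_process_rank := by
  intro rank _
  unfold Spec_process_rank process_rank process_rank_alt
  simp only []
  rw [process_rank_loop]
  simp
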